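-- pv_equiv track=rewrite | github.com/Jitenrai21/Python | ProblemSolvingPrograms_Practice/Day-11/happyLadyBugs.py | happyLadybugs
-- ===== SOURCE A (Python) =====
-- from collections import Counter
--
-- def happyLadybugs(b):
--     # Write your code here
--     counts = Counter(b)
--     for val, count in counts.items():
--         if val != '_' and count == 1:
--             return "NO"
--     if counts['_'] > 0:
--         return 'YES'
--     n = len(b)
--     for i in range(n):
--         left = b[i-1] if i > 0 else None
--         right = b[i+1] if i < n-1 else None
--         if b[i] != left and b[i] != right:
--             return 'NO'
--     return 'YES'
-- ===== SOURCE B (Python) =====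
-- def happy(b):
--     # b contains no blanks: walk maximal runs of equal colors with two indices;
--     # happy iff no run has length 1
--     i, n = 0, len(b)
--     while i < n:
--         j = i + 1
--         while j < n and b[j] == b[i]:
--             j += 1
--         if j - i == 1:
--             return False
--         i = j
--     return True
--
--
-- def happyLadybugs(b):
--     if '_' in b:
--         return "YES" if all(b.count(c) > 1 for c in set(b) if c != '_') else "NO"
--     return "YES" if happy(b) else "NO"
-- ===== Notes on version B (the rewrite author's own statement) =====
-- stated objective: simpler
-- what changed: B drops the Counter and the per-index left/right neighbor scan: with a blank present it checks b.count(c) > 1 for each distinct non-blank color, and with no blank it walks maximal runs of equal colors with two indices, rejecting any run of length 1 (which also subsumes A's singleton-color check in that branch).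
import Mathlib
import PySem

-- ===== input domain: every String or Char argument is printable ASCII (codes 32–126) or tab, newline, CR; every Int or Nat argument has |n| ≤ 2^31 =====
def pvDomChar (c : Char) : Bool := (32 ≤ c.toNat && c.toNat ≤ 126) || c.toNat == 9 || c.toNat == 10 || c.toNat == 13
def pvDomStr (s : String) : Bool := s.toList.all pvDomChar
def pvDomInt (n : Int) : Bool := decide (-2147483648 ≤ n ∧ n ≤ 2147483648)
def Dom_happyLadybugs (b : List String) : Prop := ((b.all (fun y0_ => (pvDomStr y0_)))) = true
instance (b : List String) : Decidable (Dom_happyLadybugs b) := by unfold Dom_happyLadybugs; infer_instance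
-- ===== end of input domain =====

-- B replaces A's Counter+per-index neighbor scan by a membership/count test over the
-- distinct colors and an iterative two-index walk over maximal runs; objective: simpler.


-- ===== PORT A =====
-- the 'for val, count in counts.items()' loop with its early 'return "NO"'
def pvItemsLoopA : List (String × Int) → Bool
  | [] => false
  | (val, count) :: rest => if val ≠ "_" ∧ count = 1 then true else pvItemsLoopA rest

-- the 'for i in range(n)' loop; b[i] is in range on every visited i, so the
-- comparisons 'b[i] != left' / 'b[i] != right' are taken on pyGet? b i (a some)
-- against the Option-valued left/right, exactly Python's string-vs-None compare.
def pvScanA (b : List String) (n : Int) : List Int → String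
  | [] => "YES"
  | i :: rest =>
    let left : Option String := if i > 0 then PySem.List.pyGet? b (i-1) else none
    let right : Option String := if i < n-1 then PySem.List.pyGet? b (i+1) else none
    if PySem.List.pyGet? b i ≠ left ∧ PySem.List.pyGet? b i ≠ right then "NO"
    else pvScanA b n rest

def happyLadybugs (b : List String) : String :=
  let counts := PySem.Dict.counter b
  if pvItemsLoopA counts.items then "NO"
  else if counts.getD "_" 0 > 0 then "YES"
  else pvScanA b (b.length : Int) (PySem.List.pyRange 0 (b.length : Int) 1)

-- ===== PORT B =====
-- the inner "while j < n and b[j] == b[i]: j += 1" of happy, as structural recursion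
-- on a fuel that bounds the trip count (b.length suffices; b[j], b[i] read in range)
def pvRunEnd (b : List String) (i : Nat) : Nat → Nat → Nat
  | 0, j => j
  | fuel+1, j =>
    if j < b.length && (b.getD j "" == b.getD i "") then pvRunEnd b i fuel (j+1) else j

-- the outer "while i < n" loop of happy, state = i, fuel b.length+1 (i strictly grows)
def pvHappy (b : List String) : Nat → Nat → Bool
  | 0, _ => true
  | fuel+1, i =>
    if i < b.length then
      let j := pvRunEnd b i b.length (i+1)
      if j - i == 1 then false else pvHappy b fuel j
    else true

def happyLadybugs_alt (b : List String) : String :=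
  if b.contains "_" then
    if (PySem.Set.ofList b).all (fun c => c == "_" || decide (1 < b.count c)) then "YES"
    else "NO"
  else if pvHappy b (b.length+1) 0 then "YES" else "NO"

-- ===== PRECONDITION & SPEC =====
def Spec_happyLadybugs (b : List String) (out : String) : Prop := out = happyLadybugs_alt b
instance (b : List String) (out : String) : Decidable (Spec_happyLadybugs b out) := by unfold Spec_happyLadybugs; infer_instance

-- ===== CLAIM (what is proved, stated in full; the proofs are below) =====
def Claim_equal_happyLadybugs : Prop := ∀ (b : List String), Dom_happyLadybugs b → Spec_happyLadybugs b (happyLadybugs b)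

-- ===== LEMMAS AND PROOFS =====

theorem pv_drop_len_takeWhile (p : String → Bool) (l : List String) :
    l.drop (l.takeWhile p).length = l.dropWhile p := by
  induction l with
  | nil => rfl
  | cons x xs ih =>
    by_cases h : p x = true
    · simp [h, ih]
    · simp [h]

-- A's item loop as an any()
theorem pvItemsLoopA_eq_any (l : List (String × Int)) :
    pvItemsLoopA l = l.any (fun vc => vc.1 != "_" && vc.2 == 1) := by
  induction l with
  | nil => rfl
  | cons hd tl ih =>
    obtain ⟨v, c⟩ := hd
    by_cases h : v ≠ "_" ∧ c = 1
    · simp [pvItemsLoopA, h]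
    · simp only [pvItemsLoopA, if_neg h, List.any_cons, ih]
      rw [not_and_or, not_not] at h
      rcases h with h | h <;> simp [h]

theorem pvItemsLoop_iff (b : List String) :
    pvItemsLoopA (PySem.Dict.counter b).items = true ↔ ∃ x ∈ b, x ≠ "_" ∧ b.count x = 1 := by
  rw [pvItemsLoopA_eq_any, PySem.Dict.items_counter, List.any_map, List.any_eq_true]
  constructor
  · rintro ⟨x, hx, hp⟩
    refine ⟨x, (PySem.Set.mem_ofList _ _).mp hx, ?_, ?_⟩
    · simpa using (Bool.and_eq_true ..).mp hp |>.1
    · have := (Bool.and_eq_true ..).mp hp |>.2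
      simpa using this
  · rintro ⟨x, hx, hne, hc⟩
    refine ⟨x, (PySem.Set.mem_ofList _ _).mpr hx, ?_⟩
    simp [hne, hc]

-- B's all() over set(b)
theorem pvAllB_iff (b : List String) :
    ((PySem.Set.ofList b).all (fun c => c == "_" || decide (1 < b.count c)) = true)
      ↔ ∀ x ∈ b, x ≠ "_" → 1 < b.count x := by
  rw [List.all_eq_true]
  constructor
  · intro h x hx hne
    have := h x ((PySem.Set.mem_ofList _ _).mpr hx)
    simpa [hne] using this
  · intro h x hx
    by_cases hne : x = "_"
    · simp [hne]
    · simpa [hne] using h x ((PySem.Set.mem_ofList _ _).mp hx) hne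

-- "some position is isolated", scanned left to right carrying the previous element
def pvIsoScan (prev : Option String) : List String → Bool
  | [] => false
  | x :: xs => ((prev != some x) && (xs.head? != some x)) || pvIsoScan (some x) xs

-- skipping a run of x's keeps the "isolated element later" answer
theorem pvIsoScan_skip (x : String) (t d : List String)
    (ht : ∀ y ∈ t, y = x) (hd : d.head? ≠ some x) :
    pvIsoScan (some x) (t ++ d) = pvIsoScan none d := by
  induction t with
  | nil =>
    cases d with
    | nil => rfl
    | cons z ds =>
      have hz : (some z : Option String) ≠ some x := fun h => hd (by simpa using h)
      have h1 : ((some x : Option String) != some z) = true := bne_iff_ne.mpr (Ne.symm hz)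
      have h2 : ((none : Option String) != some z) = true := rfl
      simp [pvIsoScan, h1, h2]
  | cons y t' ih =>
    have hy : y = x := ht y (by simp)
    subst hy
    simp only [List.cons_append, pvIsoScan, bne_self_eq_false, Bool.false_and,
      Bool.false_or]
    exact ih (fun z hz => ht z (by simp [hz]))

theorem pvScanA_eq_isoScan (b : List String) :
    ∀ (m j : Nat), b.length - j = m → j ≤ b.length →
      pvScanA b (b.length : Int) (PySem.List.pyRange (j : Int) (b.length : Int) 1)
        = (if pvIsoScan (if j = 0 then none else b[j-1]?) (b.drop j) then "NO" else "YES") := by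
  intro m
  induction m with
  | zero =>
    intro j hm hj
    have hje : j = b.length := by omega
    subst hje
    rw [PySem.List.pyRange_one_eq_nil (by omega)]
    simp [pvScanA, pvIsoScan, List.drop_length]
  | succ m ih =>
    intro j hm hj
    have hjl : j < b.length := by omega
    rw [PySem.List.pyRange_one_cons (by exact_mod_cast hjl)]
    have hcur : PySem.List.pyGet? b (j : Int) = some b[j] := by
      rw [PySem.List.pyGet?_natCast]
      exact List.getElem?_eq_getElem hjl
    have hleft : (if (j : Int) > 0 then PySem.List.pyGet? b ((j : Int) - 1) else none)
        = (if j = 0 then none else b[j-1]?) := by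
      rcases j with _ | jj
      · simp
      · rw [if_pos (by positivity), if_neg (Nat.succ_ne_zero jj)]
        have : ((jj + 1 : Nat) : Int) - 1 = ((jj : Nat) : Int) := by push_cast; ring
        rw [this, PySem.List.pyGet?_natCast]
        simp
    have hright : (if (j : Int) < (b.length : Int) - 1 then PySem.List.pyGet? b ((j : Int) + 1) else none)
        = b[j+1]? := by
      by_cases hlt : j + 1 < b.length
      · rw [if_pos (by exact_mod_cast (by omega : (j:Int) < (b.length:Int) - 1))]
        have : ((j : Nat) : Int) + 1 = ((j + 1 : Nat) : Int) := by push_cast; ring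
        rw [this, PySem.List.pyGet?_natCast]
      · rw [if_neg (by omega)]
        exact (List.getElem?_eq_none (by omega)).symm
    have hdrop : b.drop j = b[j] :: b.drop (j + 1) := List.drop_eq_getElem_cons hjl
    rw [pvScanA, hcur, hleft, hright, hdrop]
    set prev := (if j = 0 then none else b[j-1]?) with hprev
    have hih := ih (j + 1) (by omega) (by omega)
    rw [if_neg (Nat.succ_ne_zero j)] at hih
    simp only [Nat.add_sub_cancel] at hih
    have hj1 : ((j : Int) + 1) = ((j + 1 : Nat) : Int) := by push_cast; ring
    rw [hj1]
    by_cases hc : some b[j] ≠ prev ∧ some b[j] ≠ b[j+1]?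
    · rw [if_pos hc]
      have h1 : (prev != some b[j]) = true := by
        rcases hc with ⟨h1, _⟩; simpa [bne_iff_ne] using (Ne.symm h1)
      have h2 : ((b.drop (j+1)).head? != some b[j]) = true := by
        rw [List.head?_drop]
        rcases hc with ⟨_, h2⟩; simpa [bne_iff_ne] using (Ne.symm h2)
      rw [pvIsoScan, h1, h2]
      simp
    · rw [if_neg hc, hih]
      rw [List.getElem?_eq_getElem hjl] at hih ⊢
      have hcb : ((prev != some b[j]) && ((b.drop (j+1)).head? != some b[j])) = false := by
        rw [List.head?_drop]
        by_contra hcc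
        rw [Bool.not_eq_false, Bool.and_eq_true, bne_iff_ne, bne_iff_ne] at hcc
        exact hc ⟨(hcc.1).symm, (hcc.2).symm⟩
      rw [pvIsoScan, hcb]
      simp

theorem pvScan_final (b : List String) :
    pvScanA b (b.length : Int) (PySem.List.pyRange 0 (b.length : Int) 1)
      = (if pvIsoScan none b then "NO" else "YES") := by
  have h := pvScanA_eq_isoScan b b.length 0 (by omega) (Nat.zero_le _)
  simpa using h

-- the inner while loop consumes exactly the maximal run of b[i]'s starting at j
theorem pvRunEnd_char (b : List String) (i : Nat) :
    ∀ (fuel j : Nat), b.length - j ≤ fuel → i < j →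
      pvRunEnd b i fuel j = j + ((b.drop j).takeWhile (fun y => y == b.getD i "")).length := by
  intro fuel
  induction fuel with
  | zero =>
    intro j hm _
    have hge : b.length ≤ j := by omega
    rw [pvRunEnd, List.drop_eq_nil_of_le hge]
    simp
  | succ fuel ih =>
    intro j hm hij
    by_cases hjl : j < b.length
    · have hdrop : b.drop j = b[j] :: b.drop (j + 1) := List.drop_eq_getElem_cons hjl
      have hgd : b.getD j "" = b[j] := by simp [List.getD, List.getElem?_eq_getElem hjl]
      rw [pvRunEnd, hdrop, List.takeWhile_cons]
      by_cases hc : (b[j] == b.getD i "") = true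
      · rw [if_pos (by
            simp only [Bool.and_eq_true, decide_eq_true_eq]
            exact ⟨hjl, by rw [hgd]; exact hc⟩),
          if_pos hc, ih (j+1) (by omega) (by omega)]
        simp only [List.length_cons]
        omega
      · rw [if_neg (by
            simp only [Bool.and_eq_true, decide_eq_true_eq, not_and]
            intro _ hcc
            rw [hgd] at hcc
            exact hc hcc),
          if_neg hc]
        simp
    · rw [pvRunEnd, if_neg (by simp; omega), List.drop_eq_nil_of_le (by omega)]
      simp

-- the outer loop of happy decides "no isolated position in the remaining suffix"
theorem pvHappy_eq_isoScan (b : List String) :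
    ∀ (fuel i : Nat), b.length - i < fuel →
      pvHappy b fuel i = !pvIsoScan none (b.drop i) := by
  intro fuel
  induction fuel with
  | zero => intro i hm; omega
  | succ m ih =>
    intro i hm
    by_cases hge : b.length ≤ i
    · rw [pvHappy, if_neg (by omega), List.drop_eq_nil_of_le hge]
      simp [pvIsoScan]
    have hil : i < b.length := by omega
    obtain ⟨x, hx⟩ : ∃ x, b[i] = x := ⟨_, rfl⟩
    obtain ⟨xs, hxs⟩ : ∃ xs, b.drop (i+1) = xs := ⟨_, rfl⟩
    obtain ⟨t, ht⟩ : ∃ t, xs.takeWhile (fun y => y == x) = t := ⟨_, rfl⟩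
    have hgd : b.getD i "" = x := by simp [List.getD, List.getElem?_eq_getElem hil, hx]
    have hdrop : b.drop i = x :: xs := by rw [List.drop_eq_getElem_cons hil, hx, hxs]
    have hre : pvRunEnd b i b.length (i+1) = (i+1) + t.length := by
      rw [pvRunEnd_char b i b.length (i+1) (by omega) (by omega), hgd, hxs, ht]
    rw [pvHappy, if_pos hil]
    show (if pvRunEnd b i b.length (i+1) - i == 1 then false
          else pvHappy b m (pvRunEnd b i b.length (i+1))) = !pvIsoScan none (b.drop i)
    rw [hre, hdrop]
    by_cases hemp : t = []
    · -- the run at i has length 1: position i is isolated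
      subst hemp
      have hh : xs.head? ≠ some x := by
        intro hcon
        cases hxc : xs with
        | nil => rw [hxc] at hcon; simp at hcon
        | cons z zs =>
          rw [hxc] at hcon ht
          have hz : z = x := by simpa using hcon
          rw [List.takeWhile_cons] at ht
          simp [hz] at ht
      rw [if_pos (by simp only [List.length_nil, Nat.add_zero, beq_iff_eq]; omega)]
      have hcond : (((none : Option String) != some x) && (xs.head? != some x)) = true := by
        simp only [Bool.and_eq_true]
        exact ⟨rfl, bne_iff_ne.mpr hh⟩
      rw [pvIsoScan, hcond]
      simp
    · have hlen : 0 < t.length := List.length_pos_iff.mpr hemp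
      rw [if_neg (by simp only [beq_iff_eq]; omega)]
      have hhead : xs.head? = some x := by
        cases hxc : xs with
        | nil =>
          rw [hxc] at ht
          simp at ht
          exact absurd ht hemp
        | cons z zs =>
          rw [hxc, List.takeWhile_cons] at ht
          by_cases hz : (z == x) = true
          · have hzz : z = x := by simpa using hz
            simp [hzz]
          · rw [Bool.not_eq_true] at hz
            rw [hz] at ht
            simp at ht
            exact absurd ht hemp
      have hdw : (xs.dropWhile (fun y => y == x)).head? ≠ some x := by
        intro hcon
        rw [← List.find?_not_eq_head?_dropWhile] at hcon
        have := List.find?_some hcon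
        simp at this
      have hdj : b.drop ((i+1) + t.length) = xs.dropWhile (fun y => y == x) := by
        have h1 : xs.drop (xs.takeWhile (fun y => y == x)).length
            = xs.dropWhile (fun y => y == x) := pv_drop_len_takeWhile _ xs
        rw [← h1, ht, ← hxs, List.drop_drop]
        try (congr 1)
        try omega
      have hskip := pvIsoScan_skip x t (xs.dropWhile (fun y => y == x))
        (fun y hy => by
          rw [← ht] at hy
          simpa using List.mem_takeWhile_imp hy) hdw
      rw [← ht, List.takeWhile_append_dropWhile] at hskip
      have hrhs : pvIsoScan none (x :: xs) = pvIsoScan (some x) xs := by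
        rw [pvIsoScan, hhead]
        simp
      rw [hrhs, ih ((i+1) + t.length) (by omega), hdj, ← hskip]

-- a color occurring exactly once is isolated wherever it stands
theorem pvIso_of_count_one (x : String) :
    ∀ (b : List String) (prev : Option String), prev ≠ some x → x ∈ b → b.count x = 1 →
      pvIsoScan prev b = true := by
  intro b
  induction b with
  | nil => intro _ _ h; simp at h
  | cons y ys ih =>
    intro prev hprev hmem hcount
    by_cases hyx : y = x
    · subst hyx
      have hc0 : ys.count y = 0 := by
        rw [List.count_cons_self] at hcount; omega
      have hnm : y ∉ ys := by
        intro hin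
        have := List.count_pos_iff.mpr hin
        omega
      have hh : ys.head? ≠ some y := by
        intro hcon
        exact hnm (by rcases ys with _ | ⟨z, zs⟩ <;> simp_all)
      have h1 : (prev != some y) = true := bne_iff_ne.mpr hprev
      have h2 : (ys.head? != some y) = true := bne_iff_ne.mpr hh
      rw [pvIsoScan, h1, h2]
      simp
    · have hmem' : x ∈ ys := by
        rcases List.mem_cons.mp hmem with h | h
        · exact absurd h.symm hyx
        · exact h
      have hne3 : (y == x) = false := beq_eq_false_iff_ne.mpr hyx
      have hcount' : ys.count x = 1 := by
        rw [List.count_cons] at hcount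
        simp only [hne3, if_false, Bool.false_eq_true] at hcount
        omega
      have := ih (some y) (by simpa using hyx) hmem' hcount'
      rw [pvIsoScan, this]
      simp

-- ===== VERDICT (by name: the statement is the Claim_ definition above) =====
theorem happyLadybugs_spec : Claim_equal_happyLadybugs := by
  intro b _
  unfold Spec_happyLadybugs happyLadybugs happyLadybugs_alt
  simp only [PySem.Dict.getD_counter]
  by_cases hex : ∃ x ∈ b, x ≠ "_" ∧ b.count x = 1
  · rw [if_pos ((pvItemsLoop_iff b).mpr hex)]
    by_cases hb : "_" ∈ b
    · have hc1 : b.contains "_" = true := by simpa using hb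
      have hc2 : ¬ ((PySem.Set.ofList b).all (fun c => c == "_" || decide (1 < b.count c)) = true) := by
        intro hall
        rcases hex with ⟨x, hx, hne, hc⟩
        have := (pvAllB_iff b).mp hall x hx hne
        omega
      rw [if_pos hc1, if_neg hc2]
    · have hc1 : ¬ (b.contains "_" = true) := by simpa using hb
      rw [if_neg hc1]
      rcases hex with ⟨x, hx, _, hc⟩
      have hiso : pvIsoScan none b = true :=
        pvIso_of_count_one x b none (by simp) hx hc
      have hH : pvHappy b (b.length+1) 0 = false := by
        rw [pvHappy_eq_isoScan b (b.length+1) 0 (by omega)]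
        simp [hiso]
      rw [if_neg (by rw [hH]; exact Bool.false_ne_true)]
  · have hi : ¬ (pvItemsLoopA (PySem.Dict.counter b).items = true) :=
      fun h => hex ((pvItemsLoop_iff b).mp h)
    rw [if_neg hi]
    by_cases hb : "_" ∈ b
    · have hpos : ((b.count "_" : Int) > 0) := by
        exact_mod_cast List.count_pos_iff.mpr hb
      have hc1 : b.contains "_" = true := by simpa using hb
      have hall : (PySem.Set.ofList b).all (fun c => c == "_" || decide (1 < b.count c)) = true :=
        (pvAllB_iff b).mpr (by
          intro x hx hne
          have h1 : 0 < b.count x := List.count_pos_iff.mpr hx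
          have h2 : b.count x ≠ 1 := fun hc => hex ⟨x, hx, hne, hc⟩
          omega)
      rw [if_pos hpos, if_pos hc1, if_pos hall]
    · have hz : b.count "_" = 0 := by
        rw [List.count_eq_zero]; exact hb
      have hnpos : ¬ ((b.count "_" : Int) > 0) := by
        rw [hz]; simp
      have hc1 : ¬ (b.contains "_" = true) := by simpa using hb
      rw [if_neg hnpos, if_neg hc1, pvScan_final,
        pvHappy_eq_isoScan b (b.length+1) 0 (by omega)]
      simp only [List.drop_zero]
      by_cases hiso : pvIsoScan none b = true
      · simp [hiso]
      · simp only [Bool.not_eq_true] at hiso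
        simp [hiso]
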